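-- pv_equiv track=rewrite | github.com/homebrew9/leetcode_solutions | algorithms/medium/number_of_student_replacements.py | totalReplacements
-- ===== SOURCE A (Python) =====
-- from typing import List
--
-- def totalReplacements(ranks: List[int]) -> int:
--     N = len(ranks)
--     res = 0
--     best = ranks[0]
--     for i in range(1, N):
--         if ranks[i] < best:
--             res += 1
--             best = ranks[i]
--     return res
-- ===== SOURCE B (Python) =====
-- from typing import List
--
-- def totalReplacements(ranks: List[int]) -> int:
--     # table-then-count: build the prefix-minimum table, then count its distinct values
--     m = ranks[0]
--     mins = []
--     for x in ranks:
--         m = min(m, x)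
--         mins.append(m)
--     return len(set(mins)) - 1
-- ===== Notes on version B (the rewrite author's own statement) =====
-- stated objective: alternative
-- what changed: Replaces the single compare-and-count loop by a two-phase decomposition: build the prefix-minimum table, then return the number of distinct values in it minus one.
import Mathlib
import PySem

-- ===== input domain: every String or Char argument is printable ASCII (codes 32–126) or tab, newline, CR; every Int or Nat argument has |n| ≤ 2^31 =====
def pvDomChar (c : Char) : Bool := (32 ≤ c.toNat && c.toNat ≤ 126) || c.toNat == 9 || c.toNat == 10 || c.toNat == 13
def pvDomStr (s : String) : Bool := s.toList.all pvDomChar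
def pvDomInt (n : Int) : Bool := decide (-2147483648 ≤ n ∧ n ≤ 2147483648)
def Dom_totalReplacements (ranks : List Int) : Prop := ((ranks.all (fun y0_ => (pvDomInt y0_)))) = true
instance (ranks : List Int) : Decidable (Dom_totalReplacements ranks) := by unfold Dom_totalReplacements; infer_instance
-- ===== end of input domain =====

-- B replaces A's compare-and-count loop by a prefix-minimum table followed by a distinct-value count; equivalence proved on nonempty lists (A raises IndexError on []).

-- ===== PORT A =====
def totalReplacements (ranks : List Int) : Int :=
  let N : Int := ranks.length
  match PySem.List.pyGet? ranks 0 with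
  | none => 0   -- ranks[0] raises IndexError in Python; excluded by Pre_
  | some b0 =>
    let st := (PySem.List.pyRange 1 N 1).foldl
      (fun (st : Int × Int) i =>
        if PySem.List.pyGetD ranks i 0 < st.2 then (st.1 + 1, PySem.List.pyGetD ranks i 0) else st)
      (0, b0)
    st.1

-- ===== PORT B =====
-- the loop building `mins`: carries the running minimum m
def prefixMins (m : Int) : List Int → List Int
  | [] => []
  | x :: xs => min m x :: prefixMins (min m x) xs

def totalReplacements_alt (ranks : List Int) : Int :=
  match PySem.List.pyGet? ranks 0 with
  | none => 0   -- ranks[0] raises IndexError in Python; excluded by Pre_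
  | some m => PySem.Set.len (PySem.Set.ofList (prefixMins m ranks)) - 1

-- ===== PRECONDITION & SPEC =====
-- Pre_ excludes only the empty list, on which both Pythons raise IndexError at ranks[0].
def Pre_totalReplacements (ranks : List Int) : Prop := ranks ≠ []
instance (ranks : List Int) : Decidable (Pre_totalReplacements ranks) := by unfold Pre_totalReplacements; infer_instance
def pvWitness_totalReplacements : List Int := [3, 1, 2]

def Spec_totalReplacements (ranks : List Int) (out : Int) : Prop := out = totalReplacements_alt ranks
instance (ranks : List Int) (out : Int) : Decidable (Spec_totalReplacements ranks out) := by unfold Spec_totalReplacements; infer_instance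

-- ===== CLAIM (what is proved, stated in full; the proofs are below) =====
def Claim_equal_totalReplacements : Prop := ∀ (ranks : List Int), Dom_totalReplacements ranks → Pre_totalReplacements ranks → Spec_totalReplacements ranks (totalReplacements ranks)

-- ===== LEMMAS AND PROOFS =====

-- A's loop body as a named step
def stepA (st : Int × Int) (x : Int) : Int × Int :=
  if x < st.2 then (st.1 + 1, x) else st

-- Invariant: folding A's step adds exactly the number of NEW prefix minima to the set
lemma key (rest : List Int) : ∀ (best res : Int) (s : PySem.Set Int),
    best ∈ s → (∀ y ∈ s, best ≤ y) →
    res + (PySem.Set.update s (prefixMins best rest)).length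
      = (rest.foldl stepA (res, best)).1 + s.length := by
  induction rest with
  | nil => intro best res s _ _; simp [prefixMins, PySem.Set.update]
  | cons x xs ih =>
    intro best res s hmem hub
    by_cases h : x < best
    · have hxmin : min best x = x := by omega
      have hnot : x ∉ s := fun hx => absurd (hub x hx) (by omega)
      have hadd : PySem.Set.add s x = s ++ [x] := by
        simp [PySem.Set.add, PySem.Set.contains]
        intro hc; exact absurd hc hnot
      have := ih x (res + 1) (s ++ [x]) (by simp) (by
        intro y hy
        rcases List.mem_append.mp hy with hy | hy
        · exact le_of_lt (lt_of_lt_of_le h (hub y hy))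
        · simp at hy; omega)
      simp only [prefixMins, hxmin, PySem.Set.update, List.foldl_cons, hadd,
        List.foldl_cons, stepA, if_pos h] at *
      simp at this ⊢
      omega
    · have hxmin : min best x = best := by omega
      have hadd : PySem.Set.add s best = s := by
        simp only [PySem.Set.add, PySem.Set.contains]
        rw [if_pos (by simpa using hmem)]
      have := ih best res s hmem hub
      simp only [prefixMins, hxmin, PySem.Set.update, List.foldl_cons, hadd, stepA,
        if_neg h] at *
      simpa [PySem.Set.update] using this

-- ===== VERDICT (by name: the statement is the Claim_ definition above) =====
theorem totalReplacements_spec : Claim_equal_totalReplacements := by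
  intro ranks _ hpre
  unfold Spec_totalReplacements totalReplacements totalReplacements_alt
  cases ranks with
  | nil => exact absurd rfl hpre
  | cons r0 rest =>
    have hget : (PySem.List.pyGet? (r0 :: rest) 0) = some r0 := by
      simp [PySem.List.pyGet?, PySem.List.pyIdx?]
    rw [hget]
    have hfold : (PySem.List.pyRange 1 ((r0 :: rest).length : Int) 1).foldl
        (fun (st : Int × Int) i =>
          if PySem.List.pyGetD (r0 :: rest) i 0 < st.2
          then (st.1 + 1, PySem.List.pyGetD (r0 :: rest) i 0) else st) (0, r0)
        = ((r0 :: rest).drop 1).foldl stepA (0, r0) := by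
      exact PySem.List.foldl_pyRange_pyGetD' (r0 :: rest) 0 stepA (0, r0) (by omega)
    simp only [hfold, List.drop_one, List.tail_cons]
    have hpm : prefixMins r0 (r0 :: rest) = r0 :: prefixMins r0 rest := by
      simp [prefixMins]
    have hof : PySem.Set.ofList (prefixMins r0 (r0 :: rest))
        = PySem.Set.update (PySem.Set.add PySem.Set.empty r0) (prefixMins r0 rest) := by
      rw [hpm]; rfl
    have hk := key rest r0 0 (PySem.Set.add PySem.Set.empty r0)
      (by simp [PySem.Set.add, PySem.Set.empty, PySem.Set.contains])
      (by intro y hy; simp [PySem.Set.add, PySem.Set.empty, PySem.Set.contains] at hy; omega)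
    simp [PySem.Set.add, PySem.Set.empty, PySem.Set.contains] at hk
    rw [hof]
    simp [PySem.Set.len, PySem.Set.add, PySem.Set.empty, PySem.Set.contains]
    omega
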